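-- pv_equiv track=rewrite | github.com/AggarwalAnshul/Dynamic-Programming | findCountOfDifferentWaysExpressNSum134.py | findCountOfDifferentWaysExpressNSum134
-- ===== SOURCE A (Python) =====
-- def findCountOfDifferentWaysExpressNSum134(n):
--     lis = [1,3,4]
--     dp = [0]*(n+1)
--     dp[0] = 1
--     dp[1] = 1
--     dp[2] = 1
--     dp[3] = 2
--
--     for x in range(4, n+1):
--         dp[x] = dp[x-1]+dp[x-3]+dp[x-4]
--     return dp[n]
-- ===== SOURCE B (Python) =====
-- def _mulmod(p, q):
--     # product of two polynomials of degree < 4, reduced mod x^4 - x^3 - x - 1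
--     p0, p1, p2, p3 = p
--     q0, q1, q2, q3 = q
--     c0 = p0 * q0
--     c1 = p0 * q1 + p1 * q0
--     c2 = p0 * q2 + p1 * q1 + p2 * q0
--     c3 = p0 * q3 + p1 * q2 + p2 * q1 + p3 * q0
--     c4 = p1 * q3 + p2 * q2 + p3 * q1
--     c5 = p2 * q3 + p3 * q2
--     c6 = p3 * q3
--     # x^6 = x^5 + x^3 + x^2 ; x^5 = x^4 + x^2 + x ; x^4 = x^3 + x + 1
--     c5 += c6; c3 += c6; c2 += c6
--     c4 += c5; c2 += c5; c1 += c5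
--     c3 += c4; c1 += c4; c0 += c4
--     return (c0, c1, c2, c3)
--
-- def findCountOfDifferentWaysExpressNSum134(n):
--     # Kitamasa: r = x^n mod (x^4 - x^3 - x - 1) by binary exponentiation,
--     # answer = r0*f(0) + r1*f(1) + r2*f(2) + r3*f(3) with f(0..3) = 1,1,1,2
--     r = (1, 0, 0, 0)
--     b = (0, 1, 0, 0)
--     e = n
--     while e > 0:
--         if e & 1:
--             r = _mulmod(r, b)
--         b = _mulmod(b, b)
--         e >>= 1
--     r0, r1, r2, r3 = r
--     return r0 + r1 + r2 + 2 * r3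
-- ===== Notes on version B (the rewrite author's own statement) =====
-- stated objective: faster
-- what changed: Replaces the O(n) DP table with Kitamasa-style polynomial exponentiation: x^n is computed mod the characteristic polynomial x^4 - x^3 - x - 1 by binary squaring, and the answer is the resulting linear combination of the four base values.
import Mathlib
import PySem

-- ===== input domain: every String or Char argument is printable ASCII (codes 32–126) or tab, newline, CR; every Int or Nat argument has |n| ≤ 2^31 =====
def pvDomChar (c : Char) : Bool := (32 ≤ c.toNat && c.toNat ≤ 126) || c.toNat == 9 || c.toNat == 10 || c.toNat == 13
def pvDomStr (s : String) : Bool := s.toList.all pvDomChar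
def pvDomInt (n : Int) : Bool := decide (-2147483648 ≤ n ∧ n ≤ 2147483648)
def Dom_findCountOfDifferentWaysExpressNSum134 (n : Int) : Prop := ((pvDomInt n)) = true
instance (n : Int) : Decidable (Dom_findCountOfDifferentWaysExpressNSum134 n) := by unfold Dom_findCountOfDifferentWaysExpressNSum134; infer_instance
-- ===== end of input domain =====

-- B replaces A's O(n) DP table with Kitamasa polynomial exponentiation mod x^4-x^3-x-1 (O(log n) steps); objective: faster.

-- ===== PORT A =====
-- loop body: dp[x] = dp[x-1] + dp[x-3] + dp[x-4]
def pvStep (dp : List Int) (x : Int) : List Int :=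
  PySem.List.pySetD dp x
    (PySem.List.pyGetD dp (x - 1) 0 + PySem.List.pyGetD dp (x - 3) 0 +
      PySem.List.pyGetD dp (x - 4) 0)

def findCountOfDifferentWaysExpressNSum134 (n : Int) : Int :=
  let dp := List.replicate (n + 1).toNat (0 : Int)
  let dp := PySem.List.pySetD dp 0 1
  let dp := PySem.List.pySetD dp 1 1
  let dp := PySem.List.pySetD dp 2 1
  let dp := PySem.List.pySetD dp 3 2
  let dp := (PySem.List.pyRange 4 (n + 1) 1).foldl pvStep dp
  PySem.List.pyGetD dp n 0

-- ===== PORT B =====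
-- product of two polynomials of degree < 4, reduced mod x^4 - x^3 - x - 1
def pvMulmod (p q : Int × Int × Int × Int) : Int × Int × Int × Int :=
  match p, q with
  | (p0, p1, p2, p3), (q0, q1, q2, q3) =>
    let c0 := p0 * q0
    let c1 := p0 * q1 + p1 * q0
    let c2 := p0 * q2 + p1 * q1 + p2 * q0
    let c3 := p0 * q3 + p1 * q2 + p2 * q1 + p3 * q0
    let c4 := p1 * q3 + p2 * q2 + p3 * q1
    let c5 := p2 * q3 + p3 * q2
    let c6 := p3 * q3
    -- x^6 = x^5 + x^3 + x^2 ; x^5 = x^4 + x^2 + x ; x^4 = x^3 + x + 1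
    let c5 := c5 + c6
    let c3 := c3 + c6
    let c2 := c2 + c6
    let c4 := c4 + c5
    let c2 := c2 + c5
    let c1 := c1 + c5
    let c3 := c3 + c4
    let c1 := c1 + c4
    let c0 := c0 + c4
    (c0, c1, c2, c3)

-- the 'while e > 0' binary-exponentiation loop of Source B (e ≤ 0 runs zero iterations, so Nat is exact)
def pvPowLoop (r b : Int × Int × Int × Int) (e : Nat) : Int × Int × Int × Int :=
  if h : e = 0 then r
  else pvPowLoop (if e % 2 = 1 then pvMulmod r b else r) (pvMulmod b b) (e / 2)
  decreasing_by exact Nat.div_lt_self (Nat.pos_of_ne_zero h) one_lt_two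

def findCountOfDifferentWaysExpressNSum134_alt (n : Int) : Int :=
  let r := pvPowLoop (1, 0, 0, 0) (0, 1, 0, 0) n.toNat
  r.1 + r.2.1 + r.2.2.1 + 2 * r.2.2.2

-- ===== PRECONDITION & SPEC =====
-- A writes dp[0..3] unconditionally and so raises IndexError for every n < 3; Pre_ keeps exactly the inputs where A returns.
def Pre_findCountOfDifferentWaysExpressNSum134 (n : Int) : Prop := 3 ≤ n
instance (n : Int) : Decidable (Pre_findCountOfDifferentWaysExpressNSum134 n) := by unfold Pre_findCountOfDifferentWaysExpressNSum134; infer_instance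
def pvWitness_findCountOfDifferentWaysExpressNSum134 : Int := 5

def Spec_findCountOfDifferentWaysExpressNSum134 (n : Int) (out : Int) : Prop := out = findCountOfDifferentWaysExpressNSum134_alt n
instance (n : Int) (out : Int) : Decidable (Spec_findCountOfDifferentWaysExpressNSum134 n out) := by unfold Spec_findCountOfDifferentWaysExpressNSum134; infer_instance

-- ===== CLAIM (what is proved, stated in full; the proofs are below) =====
def Claim_equal_findCountOfDifferentWaysExpressNSum134 : Prop := ∀ (n : Int), Dom_findCountOfDifferentWaysExpressNSum134 n → Pre_findCountOfDifferentWaysExpressNSum134 n → Spec_findCountOfDifferentWaysExpressNSum134 n (findCountOfDifferentWaysExpressNSum134 n)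

-- ===== LEMMAS AND PROOFS =====

-- the sequence both programs compute: ways to write n as an ordered sum of 1, 3, 4
def pvF : Nat → Int
  | 0 => 1
  | 1 => 1
  | 2 => 1
  | 3 => 2
  | n + 4 => pvF (n + 3) + pvF (n + 1) + pvF n

lemma pvF_add4 (k : Nat) : pvF (k + 4) = pvF (k + 3) + pvF (k + 1) + pvF k := rfl

-- value of a coefficient 4-tuple against the sequence shifted by k
def pvE (p : Int × Int × Int × Int) (k : Nat) : Int :=
  p.1 * pvF k + p.2.1 * pvF (k + 1) + p.2.2.1 * pvF (k + 2) + p.2.2.2 * pvF (k + 3)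

lemma pvE_mulmod (p q : Int × Int × Int × Int) (k : Nat) :
    pvE (pvMulmod p q) k =
      p.1 * pvE q k + p.2.1 * pvE q (k + 1) + p.2.2.1 * pvE q (k + 2) + p.2.2.2 * pvE q (k + 3) := by
  obtain ⟨p0, p1, p2, p3⟩ := p
  obtain ⟨q0, q1, q2, q3⟩ := q
  simp only [pvMulmod, pvE]
  rw [show k + 1 + 1 = k + 2 from rfl, show k + 1 + 2 = k + 3 from rfl,
      show k + 1 + 3 = k + 4 from rfl, show k + 2 + 1 = k + 3 from rfl,
      show k + 2 + 2 = k + 4 from rfl, show k + 2 + 3 = k + 5 from rfl,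
      show k + 3 + 1 = k + 4 from rfl, show k + 3 + 2 = k + 5 from rfl,
      show k + 3 + 3 = k + 6 from rfl,
      show pvF (k + 6) = pvF (k + 5) + pvF (k + 3) + pvF (k + 2) from rfl,
      show pvF (k + 5) = pvF (k + 4) + pvF (k + 2) + pvF (k + 1) from rfl,
      pvF_add4]
  ring

def pvRepr (p : Int × Int × Int × Int) (a : Nat) : Prop := ∀ k, pvE p k = pvF (k + a)

lemma pvRepr_mulmod {p q : Int × Int × Int × Int} {a c : Nat}
    (hp : pvRepr p a) (hq : pvRepr q c) : pvRepr (pvMulmod p q) (a + c) := by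
  intro k
  rw [pvE_mulmod, hq, hq, hq, hq]
  have := hp (k + c)
  simp only [pvE] at this
  rw [show k + c + 1 = k + 1 + c from by omega, show k + c + 2 = k + 2 + c from by omega,
      show k + c + 3 = k + 3 + c from by omega] at this
  rw [this]
  congr 1
  omega

lemma pvRepr_cast {p : Int × Int × Int × Int} {a b : Nat} (h : pvRepr p a) (hab : a = b) :
    pvRepr p b := hab ▸ h

lemma pvPowLoop_repr : ∀ (e : Nat) (r b : Int × Int × Int × Int) (a c : Nat),
    pvRepr r a → pvRepr b c → pvRepr (pvPowLoop r b e) (a + c * e) := by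
  intro e
  induction e using Nat.strong_induction_on with
  | _ e ih =>
    intro r b a c hr hb
    rw [pvPowLoop]
    split
    · rename_i h0; subst h0; simpa using hr
    · rename_i h0
      have hlt : e / 2 < e := Nat.div_lt_self (Nat.pos_of_ne_zero h0) one_lt_two
      have hr' : pvRepr (if e % 2 = 1 then pvMulmod r b else r) (a + c * (e % 2)) := by
        split
        · rename_i h1; rw [h1, Nat.mul_one]; exact pvRepr_mulmod hr hb
        · rename_i h1
          have : e % 2 = 0 := by omega
          rw [this, Nat.mul_zero, Nat.add_zero]; exact hr
      have hb' : pvRepr (pvMulmod b b) (c + c) := pvRepr_mulmod hb hb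
      have := ih (e / 2) hlt _ _ _ _ hr' hb'
      refine pvRepr_cast this ?_
      have h2 : e % 2 + 2 * (e / 2) = e := by omega
      calc a + c * (e % 2) + (c + c) * (e / 2)
          = a + c * (e % 2 + 2 * (e / 2)) := by ring
        _ = a + c * e := by rw [h2]

lemma pvRepr_one : pvRepr (1, 0, 0, 0) 0 := by
  intro k; simp [pvE]

lemma pvRepr_x : pvRepr (0, 1, 0, 0) 1 := by
  intro k; simp [pvE]

lemma alt_eq_pvF (n : Int) : findCountOfDifferentWaysExpressNSum134_alt n = pvF n.toNat := by
  have h0 := pvPowLoop_repr n.toNat (1, 0, 0, 0) (0, 1, 0, 0) 0 1 pvRepr_one pvRepr_x 0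
  simp only [pvE, show pvF 0 = 1 from rfl, show pvF (0 + 1) = 1 from rfl,
    show pvF (0 + 2) = 1 from rfl, show pvF (0 + 3) = 2 from rfl,
    Nat.one_mul, Nat.zero_add] at h0
  unfold findCountOfDifferentWaysExpressNSum134_alt
  rw [← h0]
  ring

-- A side: the dp list after the initial four writes, length N+1
def pvDp0 (N : Nat) : List Int :=
  PySem.List.pySetD (PySem.List.pySetD (PySem.List.pySetD (PySem.List.pySetD
    (List.replicate (N + 1) (0 : Int)) 0 1) 1 1) 2 1) 3 2

lemma pvDp0_length (N : Nat) : (pvDp0 N).length = N + 1 := by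
  simp [pvDp0, PySem.List.pySetD_of_nonneg]

lemma pvDp0_getElem? (N : Nat) (hN : 3 ≤ N) (i : Nat) (hi : i ≤ 3) :
    (pvDp0 N)[i]? = some (pvF i) := by
  interval_cases i <;>
    simp [pvDp0, PySem.List.pySetD_of_nonneg, List.getElem?_set, pvF] <;> omega

lemma pvLoop_inv (N : Nat) (hN : 3 ≤ N) : ∀ m : Nat, 3 ≤ m → m ≤ N →
    ((PySem.List.pyRange 4 ((m : Int) + 1) 1).foldl pvStep (pvDp0 N)).length = N + 1 ∧
    ∀ i : Nat, i ≤ m →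
      ((PySem.List.pyRange 4 ((m : Int) + 1) 1).foldl pvStep (pvDp0 N))[i]? = some (pvF i) := by
  intro m hm
  induction m, hm using Nat.le_induction with
  | base =>
    intro _
    rw [show ((3 : Nat) : Int) + 1 = 4 from by norm_num,
        PySem.List.pyRange_one_eq_nil (by omega), List.foldl_nil]
    exact ⟨pvDp0_length N, fun i hi => pvDp0_getElem? N hN i hi⟩
  | succ m hm ih =>
    intro hmN
    obtain ⟨hlen, hval⟩ := ih (by omega)
    rw [show ((m + 1 : Nat) : Int) + 1 = ((m : Int) + 1) + 1 from by push_cast; ring,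
        PySem.List.pyRange_one_succ_right (by omega), List.foldl_append, List.foldl_cons,
        List.foldl_nil]
    set L := (PySem.List.pyRange 4 ((m : Int) + 1) 1).foldl pvStep (pvDp0 N) with hL
    have hget : ∀ j : Nat, j ≤ m → PySem.List.pyGetD L (j : Int) 0 = pvF j := by
      intro j hj
      rw [PySem.List.pyGetD_natCast, List.getD_eq_getElem?_getD, hval j hj]
      rfl
    have hv : PySem.List.pyGetD L ((m : Int) + 1 - 1) 0 + PySem.List.pyGetD L ((m : Int) + 1 - 3) 0 +
        PySem.List.pyGetD L ((m : Int) + 1 - 4) 0 = pvF (m + 1) := by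
      rw [show (m : Int) + 1 - 1 = ((m : Nat) : Int) from by ring,
          show (m : Int) + 1 - 3 = ((m - 2 : Nat) : Int) from by omega,
          show (m : Int) + 1 - 4 = ((m - 3 : Nat) : Int) from by omega,
          hget m (by omega), hget (m - 2) (by omega), hget (m - 3) (by omega)]
      have h4 := pvF_add4 (m - 3)
      rw [show m - 3 + 4 = m + 1 from by omega, show m - 3 + 3 = m from by omega,
          show m - 3 + 1 = m - 2 from by omega] at h4
      rw [h4]
    have hset : pvStep L ((m : Int) + 1) = L.set (m + 1) (pvF (m + 1)) := by
      rw [pvStep, hv, show (m : Int) + 1 = ((m + 1 : Nat) : Int) from by push_cast; ring,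
          PySem.List.pySetD_natCast]
    rw [hset]
    refine ⟨by simp [hlen], fun i hi => ?_⟩
    rw [List.getElem?_set]
    by_cases hie : m + 1 = i
    · subst hie
      rw [if_pos rfl, if_pos (by omega)]
    · rw [if_neg hie]
      exact hval i (by omega)

lemma a_eq_pvF (n : Int) (hn : 3 ≤ n) : findCountOfDifferentWaysExpressNSum134 n = pvF n.toNat := by
  set N := n.toNat with hNdef
  have hnN : n = (N : Int) := by omega
  have hN3 : 3 ≤ N := by omega
  show PySem.List.pyGetD ((PySem.List.pyRange 4 (n + 1) 1).foldl pvStep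
    (PySem.List.pySetD (PySem.List.pySetD (PySem.List.pySetD (PySem.List.pySetD
      (List.replicate (n + 1).toNat (0 : Int)) 0 1) 1 1) 2 1) 3 2)) n 0 = pvF N
  have hrepl : (n + 1).toNat = N + 1 := by omega
  have hdp0 : (PySem.List.pySetD (PySem.List.pySetD (PySem.List.pySetD (PySem.List.pySetD
      (List.replicate (n + 1).toNat (0 : Int)) 0 1) 1 1) 2 1) 3 2) = pvDp0 N := by
    rw [pvDp0, hrepl]
  rw [hdp0, hnN]
  obtain ⟨_, hval⟩ := pvLoop_inv N hN3 N hN3 le_rfl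
  rw [PySem.List.pyGetD_natCast, List.getD_eq_getElem?_getD, hval N le_rfl]
  rfl

-- ===== VERDICT (by name: the statement is the Claim_ definition above) =====
theorem findCountOfDifferentWaysExpressNSum134_spec : Claim_equal_findCountOfDifferentWaysExpressNSum134 := by
  intro n _ hpre
  show findCountOfDifferentWaysExpressNSum134 n = findCountOfDifferentWaysExpressNSum134_alt n
  rw [a_eq_pvF n hpre, alt_eq_pvF]
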